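-- pv_equiv track=rewrite | github.com/mrbartrns/algorithm-and-structure | programmers/lv4/cave_3.py | solution
-- ===== SOURCE A (Python) =====
-- from collections import deque
--
-- def dfs(node, visited, on_same_path, graph):
--     visited[node] = True
--     on_same_path[node] = True
--     for nxt in graph[node]:
--         if not visited[nxt]:
--             if not dfs(nxt, visited, on_same_path, graph):
--                 return False
--         if on_same_path[nxt]:
--             return False
--     on_same_path[node] = False
--     return True
--
-- def bfs(graph, visited):
--     que = deque()
--     dir_graph = [[] for _ in range(len(graph))]
--     visited[0] = True
--     que.append(0)
--     while que:
--         node = que.popleft()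
--
--         for nxt in graph[node]:
--             if not visited[nxt]:
--                 visited[nxt] = True
--                 que.append(nxt)
--                 dir_graph[node].append(nxt)
--     return dir_graph
--
-- def solution(n, path, order):
--     visited = [False] * n
--     dir_vsitied = [False] * n
--     on_same_path = [False] * n
--     graph = [[] for _ in range(n)]
--     for a, b in path:
--         graph[a].append(b)
--         graph[b].append(a)
--
--     dir_graph = bfs(graph, visited)
--
--     for a, b in order:
--         dir_graph[a].append(b)
--
--     return dfs(0, dir_vsitied, on_same_path, dir_graph)
-- ===== SOURCE B (Python) =====
-- from collections import deque
--
-- def solution(n, path, order):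
--     graph = [[] for _ in range(n)]
--     for a, b in path:
--         graph[a].append(b)
--         graph[b].append(a)
--     visited = [False] * n
--     visited[0] = True
--     que = deque([0])
--     dir_graph = [[] for _ in range(n)]
--     while que:
--         node = que.popleft()
--         for nxt in graph[node]:
--             if not visited[nxt]:
--                 visited[nxt] = True
--                 que.append(nxt)
--                 dir_graph[node].append(nxt)
--     for a, b in order:
--         dir_graph[a].append(b)
--     # iterative three-color DFS from node 0 (explicit stack of [node, next-child-index])
--     seen = [False] * n
--     gray = [False] * n
--     seen[0] = True
--     gray[0] = True
--     stack = [[0, 0]]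
--     while stack:
--         node, i = stack[-1]
--         if i == len(dir_graph[node]):
--             gray[node] = False
--             stack.pop()
--             continue
--         stack[-1][1] = i + 1
--         nxt = dir_graph[node][i]
--         if gray[nxt]:
--             return False
--         if not seen[nxt]:
--             seen[nxt] = True
--             gray[nxt] = True
--             stack.append([nxt, 0])
--     return True
-- ===== Notes on version B (the rewrite author's own statement) =====
-- stated objective: alternative
-- what changed: The recursive three-array DFS (dfs helper with early returns propagated up the call chain) is replaced by an iterative three-color traversal using an explicit stack of [node, next-child-index] frames; the undirected graph build, the BFS spanning-tree construction and the order-edge appending are kept as in A.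
-- outside the precondition, e.g. on solution(2, [], [(1, 5)]): A returns True, B returns True
import Mathlib
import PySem

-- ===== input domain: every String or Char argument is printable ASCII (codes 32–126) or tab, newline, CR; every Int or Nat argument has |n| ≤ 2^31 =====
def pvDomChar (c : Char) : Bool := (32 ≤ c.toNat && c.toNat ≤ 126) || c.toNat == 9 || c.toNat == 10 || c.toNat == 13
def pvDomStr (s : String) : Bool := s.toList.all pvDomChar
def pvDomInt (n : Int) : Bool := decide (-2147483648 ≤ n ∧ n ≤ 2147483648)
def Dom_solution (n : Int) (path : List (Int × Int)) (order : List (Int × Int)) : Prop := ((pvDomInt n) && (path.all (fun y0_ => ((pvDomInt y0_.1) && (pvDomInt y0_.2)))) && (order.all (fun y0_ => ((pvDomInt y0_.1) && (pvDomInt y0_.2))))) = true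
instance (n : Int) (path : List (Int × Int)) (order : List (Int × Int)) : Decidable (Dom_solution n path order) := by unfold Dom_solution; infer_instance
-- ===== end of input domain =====

-- B replaces A's recursive dfs by an iterative explicit-stack three-color traversal; graph build,
-- BFS spanning tree and order-edge appending are kept as in A. Equivalence is on the return value.

-- ===== PORT A =====
-- Python list indexing/assignment with Python's negative-index wraparound
-- (exact for -len ≤ i < len; Python raises outside that range, which Pre_ excludes)
def nidx (len : Nat) (i : Int) : Nat := (if i < 0 then i + len else i).toNat
def getB (v : List Bool) (i : Int) : Bool := v.getD (nidx v.length i) false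
def setB (v : List Bool) (i : Int) (b : Bool) : List Bool := v.set (nidx v.length i) b
def adjL (g : List (List Int)) (i : Int) : List Int := g.getD (nidx g.length i) []
def appendAt (g : List (List Int)) (i : Int) (x : Int) : List (List Int) := g.set (nidx g.length i) (adjL g i ++ [x])
def countF (v : List Bool) : Nat := v.count false

theorem count_set_true : ∀ (v : List Bool) (j : Nat), j < v.length → v.getD j false = false →
    (v.set j true).count false + 1 = v.count false := by
  intro v
  induction v with
  | nil => intro j h; simp at h
  | cons a as ih =>
    intro j h hf
    cases j with
    | zero => simp_all
    | succ m =>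
      simp only [List.getD_cons_succ] at hf
      simp only [List.set_cons_succ, List.count_cons]
      have := ih m (by simpa using Nat.lt_of_succ_lt_succ h) hf
      omega

theorem countF_set_true {v : List Bool} {x : Int} (h : nidx v.length x < v.length)
    (hf : getB v x = false) : countF (setB v x true) + 1 = countF v :=
  count_set_true v (nidx v.length x) h hf

-- BFS inner for-loop: `for nxt in graph[node]` (in-range test is a totality guard; Python raises there)
def bfsVisit (v : List Bool) (que : List Int) (dir : List (List Int)) (node : Int) :
    List Int → List Bool × List Int × List (List Int)
  | [] => (v, que, dir)
  | nxt :: ls =>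
    if getB v nxt = false ∧ nidx v.length nxt < v.length then
      bfsVisit (setB v nxt true) (que ++ [nxt]) (appendAt dir node nxt) node ls
    else bfsVisit v que dir node ls

theorem bfsVisit_measure (v : List Bool) (que : List Int) (dir : List (List Int)) (node : Int) :
    ∀ l, countF (bfsVisit v que dir node l).1 + (bfsVisit v que dir node l).2.1.length ≤
      countF v + que.length := by
  intro l
  induction l generalizing v que dir with
  | nil => simp [bfsVisit]
  | cons nxt ls ih =>
    rw [bfsVisit]
    split
    · rename_i h
      have h1 := countF_set_true h.2 h.1
      have h2 := ih (setB v nxt true) (que ++ [nxt]) (appendAt dir node nxt)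
      simp only [List.length_append, List.length_cons, List.length_nil] at h2 ⊢
      omega
    · exact ih v que dir

def bfsRun (graph : List (List Int)) (v : List Bool) (que : List Int) (dir : List (List Int)) :
    List (List Int) :=
  match que with
  | [] => dir
  | node :: rest =>
    let s := bfsVisit v rest dir node (adjL graph node)
    bfsRun graph s.1 s.2.1 s.2.2
termination_by countF v + que.length
decreasing_by
  have := bfsVisit_measure v rest dir node (adjL graph node)
  simp only [List.length_cons]
  omega

-- PORT of A's recursive dfs; fuel makes the recursion total (none = out of fuel; proved unreachable)
mutual
def dfsA (dir : List (List Int)) : Nat → Int → List Bool → List Bool →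
    Option (Bool × List Bool × List Bool)
  | 0, _, _, _ => none
  | f + 1, node, v, g =>
    match loopA dir f (adjL dir node) (setB v node true) (setB g node true) with
    | none => none
    | some (false, v2, g2) => some (false, v2, g2)
    | some (true, v2, g2) => some (true, v2, setB g2 node false)
termination_by f => (f, 0, 0)

def loopA (dir : List (List Int)) : Nat → List Int → List Bool → List Bool →
    Option (Bool × List Bool × List Bool)
  | _, [], v, g => some (true, v, g)
  | f, nxt :: rest, v, g =>
    if getB v nxt = false then
      match dfsA dir f nxt v g with
      | none => none
      | some (false, v', g') => some (false, v', g')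
      | some (true, v', g') =>
        if getB g' nxt then some (false, v', g')
        else loopA dir f rest v' g'
    else if getB g nxt then some (false, v, g)
    else loopA dir f rest v g
termination_by f l => (f, 1, l.length)
end


-- ===== PORT B =====
-- PORT of B's explicit-stack loop; helpers for its termination measure
def maxAdj (dir : List (List Int)) : Nat := dir.foldr (fun l m => max l.length m) 0

theorem mem_length_le_maxAdj : ∀ (dir : List (List Int)) (l : List Int), l ∈ dir → l.length ≤ maxAdj dir := by
  intro dir
  induction dir with
  | nil => intro l hl; simp at hl
  | cons a as ih =>
    intro l hl
    rcases List.mem_cons.mp hl with h0 | h0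
    · simp only [maxAdj, List.foldr_cons, h0]
      omega
    · have := ih l h0
      simp only [maxAdj, List.foldr_cons] at this ⊢
      omega

theorem adjL_length_le_maxAdj (dir : List (List Int)) (x : Int) :
    (adjL dir x).length ≤ maxAdj dir := by
  unfold adjL
  by_cases h : nidx dir.length x < dir.length
  · rw [List.getD_eq_getElem dir [] h]
    exact mem_length_le_maxAdj dir _ (List.getElem_mem h)
  · rw [List.getD_eq_default dir [] (by omega)]
    simp

def wsum (dir : List (List Int)) (stack : List (Int × Nat)) : Nat :=
  stack.foldr (fun p s => ((adjL dir p.1).length + 1 - p.2) + s) 0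

def machineRun (dir : List (List Int)) (v g : List Bool) (stack : List (Int × Nat)) : Bool :=
  match stack with
  | [] => true
  | (node, i) :: rest =>
    if h : i < (adjL dir node).length then
      let nxt := (adjL dir node)[i]
      if getB g nxt then false
      else if getB v nxt then machineRun dir v g ((node, i + 1) :: rest)
      else if h2 : nidx v.length nxt < v.length then
        machineRun dir (setB v nxt true) (setB g nxt true) ((nxt, 0) :: (node, i + 1) :: rest)
      else false   -- Python raises IndexError here (out-of-range node); excluded by Pre_
    else
      machineRun dir v (setB g node false) rest
termination_by countF v * (maxAdj dir + 3) + wsum dir stack + stack.length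
decreasing_by
  · simp only [wsum, List.foldr_cons, List.length_cons]
    omega
  · rename_i _ hv
    have h1 : countF (setB v ((adjL dir node)[i]) true) + 1 = countF v :=
      countF_set_true h2 (by simpa using hv)
    have h3 := adjL_length_le_maxAdj dir ((adjL dir node)[i])
    simp only [wsum, List.foldr_cons, List.length_cons]
    rw [← h1, Nat.succ_mul]
    omega
  · simp only [wsum, List.foldr_cons, List.length_cons]
    omega

-- shared build phase: undirected graph + BFS spanning tree + order edges
-- (this phase is textually identical in A and in B; the two ports differ in the traversal below it)
def buildDir (n : Int) (path : List (Int × Int)) (order : List (Int × Int)) : List (List Int) :=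
  let graph := path.foldl (fun gr ab => appendAt (appendAt gr ab.1 ab.2) ab.2 ab.1)
    (List.replicate n.toNat [])
  let dir := bfsRun graph (setB (List.replicate n.toNat false) 0 true) [0]
    (List.replicate n.toNat [])
  order.foldl (fun d ab => appendAt d ab.1 ab.2) dir

def solution (n : Int) (path : List (Int × Int)) (order : List (Int × Int)) : Bool :=
  let dir := buildDir n path order
  match dfsA dir (n.toNat + 2) 0 (List.replicate n.toNat false) (List.replicate n.toNat false) with
  | some (b, _, _) => b
  | none => false

def solution_alt (n : Int) (path : List (Int × Int)) (order : List (Int × Int)) : Bool :=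
  let dir := buildDir n path order
  machineRun dir (setB (List.replicate n.toNat false) 0 true)
    (setB (List.replicate n.toNat false) 0 true) [(0, 0)]


-- ===== PRECONDITION & SPEC =====
-- Pre_ excludes n ≤ 0 and edge endpoints outside [-n, n) (Python's valid index range, including
-- negative wraparound): there A raises IndexError, except for an out-of-range order endpoint that
-- the traversal never reaches, where A returns without ever dereferencing it.
def Pre_solution (n : Int) (path : List (Int × Int)) (order : List (Int × Int)) : Prop :=
  1 ≤ n ∧ (∀ p ∈ path, -n ≤ p.1 ∧ p.1 < n ∧ -n ≤ p.2 ∧ p.2 < n) ∧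
    (∀ p ∈ order, -n ≤ p.1 ∧ p.1 < n ∧ -n ≤ p.2 ∧ p.2 < n)
instance (n : Int) (path : List (Int × Int)) (order : List (Int × Int)) :
    Decidable (Pre_solution n path order) := by unfold Pre_solution; infer_instance

def pvWitness_solution : Int × (List (Int × Int)) × (List (Int × Int)) := (2, [(0, 1)], [(0, 1)])

def Spec_solution (n : Int) (path : List (Int × Int)) (order : List (Int × Int)) (out : Bool) : Prop :=
  out = solution_alt n path order
instance (n : Int) (path : List (Int × Int)) (order : List (Int × Int)) (out : Bool) :
    Decidable (Spec_solution n path order out) := by unfold Spec_solution; infer_instance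

-- ===== CLAIM (what is proved, stated in full; the proofs are below) =====
def Claim_equal_solution : Prop := ∀ (n : Int) (path : List (Int × Int)) (order : List (Int × Int)), Dom_solution n path order → Pre_solution n path order → Spec_solution n path order (solution n path order)

-- ===== LEMMAS AND PROOFS =====

theorem count_set_true_le : ∀ (v : List Bool) (j : Nat),
    (v.set j true).count false ≤ v.count false := by
  intro v
  induction v with
  | nil => intro j; simp
  | cons a as ih =>
    intro j
    cases j with
    | zero => cases a <;> simp
    | succ m =>
      simp only [List.set_cons_succ, List.count_cons]
      have := ih m
      omega

theorem countF_set_le (v : List Bool) (x : Int) : countF (setB v x true) ≤ countF v :=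
  count_set_true_le v (nidx v.length x)

-- the gray array is covered by the visited array
def InvVG (v g : List Bool) : Prop := ∀ j : Nat, g.getD j false = true → v.getD j false = true

-- every entry of every adjacency list lies in [-N, N): a valid Python index for length N
def GoodDir (d : List (List Int)) (N : Nat) : Prop := ∀ l ∈ d, ∀ x ∈ l, -(N : Int) ≤ x ∧ x < N

theorem getB_setB_false_self (g : List Bool) (x : Int) : getB (setB g x false) x = false := by
  unfold getB setB
  by_cases h : nidx g.length x < g.length
  · rw [List.length_set, List.getD_eq_getElem _ _ (by simpa using h)]
    simp
  · rw [List.set_eq_of_length_le (by omega), List.getD_eq_default _ _ (by omega)]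

theorem Inv_set_both {v g : List Bool} {x : Int} (hlen : v.length = g.length)
    (h : nidx v.length x < v.length) (hI : InvVG v g) :
    InvVG (setB v x true) (setB g x true) := by
  intro j hj
  unfold setB at hj ⊢
  rw [← hlen] at hj
  by_cases hjx : j = nidx v.length x
  · subst hjx
    rw [List.getD_eq_getElem _ _ (by simpa using h)]
    simp
  · rw [List.getD_eq_getElem?_getD, List.getElem?_set_ne (by omega), ← List.getD_eq_getElem?_getD]
    rw [List.getD_eq_getElem?_getD, List.getElem?_set_ne (by omega), ← List.getD_eq_getElem?_getD] at hj
    exact hI j hj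

theorem good_adjL {dir : List (List Int)} {N : Nat} (hG : GoodDir dir N) {node x : Int}
    (hx : x ∈ adjL dir node) : -(N : Int) ≤ x ∧ x < N := by
  unfold adjL at hx
  by_cases h : nidx dir.length node < dir.length
  · rw [List.getD_eq_getElem _ _ h] at hx
    exact hG _ (List.getElem_mem h) x hx
  · rw [List.getD_eq_default _ _ (by omega)] at hx
    simp at hx

theorem nidx_lt_of_range {N : Nat} {x : Int} (h1 : -(N : Int) ≤ x) (h2 : x < N) :
    nidx N x < N := by
  unfold nidx
  split <;> omega

theorem Inv_set_both_len {v g : List Bool} {x : Int} (hlen : v.length = g.length)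
    (hI : InvVG v g) : InvVG (setB v x true) (setB g x true) := by
  by_cases h : nidx v.length x < v.length
  · exact Inv_set_both hlen h hI
  · unfold setB
    rw [List.set_eq_of_length_le (by omega), List.set_eq_of_length_le (by rw [← hlen]; omega)]
    exact hI

theorem Inv_set_false {v g : List Bool} {x : Int} (hI : InvVG v g) :
    InvVG v (setB g x false) := by
  intro j hj
  unfold setB at hj
  by_cases hjx : j = nidx g.length x
  · subst hjx
    by_cases h : nidx g.length x < g.length
    · rw [List.getD_eq_getElem _ _ (by simpa using h)] at hj
      simp at hj
    · rw [List.set_eq_of_length_le (by omega)] at hj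
      exact hI _ hj
  · rw [List.getD_eq_getElem?_getD, List.getElem?_set_ne (by omega),
      ← List.getD_eq_getElem?_getD] at hj
    exact hI j hj

-- result shape of dfsA/loopA: lengths preserved, countF does not grow, InvVG preserved
def PD (dir : List (List Int)) (f : Nat) : Prop := ∀ node v g b v' g',
  dfsA dir f node v g = some (b, v', g') → v.length = g.length →
    v'.length = v.length ∧ g'.length = g.length ∧ countF v' ≤ countF v ∧ (InvVG v g → InvVG v' g')
def PL (dir : List (List Int)) (f : Nat) : Prop := ∀ l v g b v' g',
  loopA dir f l v g = some (b, v', g') → v.length = g.length →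
    v'.length = v.length ∧ g'.length = g.length ∧ countF v' ≤ countF v ∧ (InvVG v g → InvVG v' g')

theorem propsD_aux (dir : List (List Int)) (f : Nat) (hL : PL dir f) : PD dir (f + 1) := by
  intro node v g b v' g' hd hlen
  rw [dfsA] at hd
  cases hl : loopA dir f (adjL dir node) (setB v node true) (setB g node true) with
  | none => rw [hl] at hd; simp at hd
  | some r =>
    obtain ⟨b2, v2, g2⟩ := r
    rw [hl] at hd
    have hlen2 : (setB v node true).length = (setB g node true).length := by
      simp [setB, hlen]
    have hp := hL _ _ _ _ _ _ hl hlen2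
    simp only [setB, List.length_set] at hp
    have hcf : countF v2 ≤ countF v := le_trans hp.2.2.1 (countF_set_le v node)
    have hinv : InvVG v g → InvVG v2 g2 := fun hI => hp.2.2.2 (Inv_set_both_len hlen hI)
    cases b2 with
    | false =>
      simp only [] at hd
      injection hd with hd1; injection hd1 with e1 hd2; injection hd2 with e2 e3
      subst e1; subst e2; subst e3
      exact ⟨hp.1, hp.2.1, hcf, hinv⟩
    | true =>
      simp only [] at hd
      injection hd with hd1; injection hd1 with e1 hd2; injection hd2 with e2 e3
      subst e1; subst e2; subst e3
      refine ⟨hp.1, by simp [setB, hp.2.1], hcf, fun hI => Inv_set_false (hinv hI)⟩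

theorem propsL (dir : List (List Int)) : ∀ f, PL dir f := by
  intro f
  induction f using Nat.strong_induction_on with
  | _ f IHf =>
    intro l
    induction l with
    | nil =>
      intro v g b v' g' h hlen
      rw [loopA] at h
      injection h with h1; injection h1 with e1 h2; injection h2 with e2 e3
      subst e1; subst e2; subst e3
      exact ⟨rfl, rfl, le_refl _, id⟩
    | cons nxt rest ihl =>
      intro v g b v' g' h hlen
      rw [loopA] at h
      by_cases hv : getB v nxt = false
      · rw [if_pos hv] at h
        cases hd : dfsA dir f nxt v g with
        | none => rw [hd] at h; simp at h
        | some r =>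
          obtain ⟨b1, v1, g1⟩ := r
          rw [hd] at h
          cases f with
          | zero => simp [dfsA] at hd
          | succ f0 =>
            have hp := propsD_aux dir f0 (IHf f0 (by omega)) _ _ _ _ _ _ hd hlen
            cases b1 with
            | false =>
              simp only [] at h
              injection h with h1; injection h1 with e1 h2; injection h2 with e2 e3
              subst e1; subst e2; subst e3
              exact ⟨hp.1, hp.2.1, hp.2.2.1, hp.2.2.2⟩
            | true =>
              simp only [] at h
              by_cases hg1 : getB g1 nxt = true
              · rw [if_pos hg1] at h
                injection h with h1; injection h1 with e1 h2; injection h2 with e2 e3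
                subst e1; subst e2; subst e3
                exact ⟨hp.1, hp.2.1, hp.2.2.1, hp.2.2.2⟩
              · rw [if_neg hg1] at h
                have hq := ihl v1 g1 b v' g' h (hp.1.trans (hlen.trans hp.2.1.symm))
                exact ⟨hq.1.trans hp.1, hq.2.1.trans hp.2.1, hq.2.2.1.trans hp.2.2.1,
                  fun hI => hq.2.2.2 (hp.2.2.2 hI)⟩
      · rw [if_neg hv] at h
        by_cases hg : getB g nxt = true
        · rw [if_pos hg] at h
          injection h with h1; injection h1 with e1 h2; injection h2 with e2 e3
          subst e1; subst e2; subst e3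
          exact ⟨rfl, rfl, le_refl _, id⟩
        · rw [if_neg hg] at h
          exact ihl v g b v' g' h hlen

theorem propsD (dir : List (List Int)) (f : Nat) : PD dir f := by
  cases f with
  | zero => intro node v g b v' g' hd _; simp [dfsA] at hd
  | succ f0 => exact propsD_aux dir f0 (propsL dir f0)

-- fuel sufficiency
def SL (dir : List (List Int)) (f : Nat) : Prop := ∀ l v g, countF v < f → dir.length = v.length →
  v.length = g.length → ∃ r, loopA dir f l v g = some r
def SD (dir : List (List Int)) (f : Nat) : Prop := ∀ node v g, getB v node = false →
  countF v ≤ f → dir.length = v.length → v.length = g.length →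
    ∃ r, dfsA dir (f + 1) node v g = some r

theorem suffD_aux (dir : List (List Int)) (f : Nat) (hL : SL dir f) : SD dir f := by
  intro node v g hnode hcf hdlen hlen
  rw [dfsA]
  by_cases h : nidx v.length node < v.length
  · have h1 := countF_set_true h hnode
    obtain ⟨⟨b2, v2, g2⟩, hr⟩ := hL (adjL dir node) (setB v node true) (setB g node true)
      (by omega) (by simp only [setB, List.length_set]; exact hdlen) (by simp [setB, hlen])
    rw [hr]
    cases b2
    · exact ⟨_, rfl⟩
    · exact ⟨_, rfl⟩
  · have hadj : adjL dir node = [] := by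
      unfold adjL
      rw [List.getD_eq_default _ _ (by rw [hdlen]; omega)]
    rw [hadj, loopA]
    exact ⟨_, rfl⟩

theorem suffL (dir : List (List Int)) : ∀ f, SL dir f := by
  intro f
  induction f using Nat.strong_induction_on with
  | _ f IHf =>
    intro l
    induction l with
    | nil =>
      intro v g _ _ _
      refine ⟨(true, v, g), ?_⟩
      rw [loopA]
    | cons nxt rest ihl =>
      intro v g hcf hdlen hlen
      by_cases hv : getB v nxt = false
      · cases f with
        | zero => omega
        | succ f0 =>
          obtain ⟨⟨b1, v1, g1⟩, hd⟩ := suffD_aux dir f0 (IHf f0 (by omega)) nxt v g hv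
            (by omega) hdlen hlen
          have hp := propsD dir (f0 + 1) _ _ _ _ _ _ hd hlen
          rw [loopA, if_pos hv, hd]
          cases b1 with
          | false => exact ⟨_, rfl⟩
          | true =>
            show ∃ r, (if getB g1 nxt = true then some (false, v1, g1)
              else loopA dir (f0 + 1) rest v1 g1) = some r
            by_cases hg1 : getB g1 nxt = true
            · rw [if_pos hg1]
              exact ⟨_, rfl⟩
            · obtain ⟨r, hr⟩ := ihl v1 g1 (by have := hp.2.2.1; omega)
                (by rw [hp.1]; exact hdlen) (hp.1.trans (hlen.trans hp.2.1.symm))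
              rw [if_neg hg1]
              exact ⟨r, hr⟩
      · rw [loopA, if_neg hv]
        by_cases hg : getB g nxt = true
        · rw [if_pos hg]
          exact ⟨_, rfl⟩
        · rw [if_neg hg]
          exact ihl v g hcf hdlen hlen

theorem suffD (dir : List (List Int)) (f : Nat) : SD dir f :=
  suffD_aux dir f (suffL dir f)

-- the simulation: one loopA run over l (the still-unprocessed suffix of node's adjacency list)
-- is one machine run of the frame (node, i)
theorem simLoop (dir : List (List Int)) : ∀ (f : Nat) (l : List Int) (node : Int)
    (v g : List Bool) (b : Bool) (v' g' : List Bool) (i : Nat) (rest : List (Int × Nat)),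
    loopA dir f l v g = some (b, v', g') →
    (adjL dir node).drop i = l →
    v.length = g.length →
    GoodDir dir v.length →
    InvVG v g →
    machineRun dir v g ((node, i) :: rest) =
      (if b then machineRun dir v' (setB g' node false) rest else false) := by
  intro f
  induction f using Nat.strong_induction_on with
  | _ f IHf =>
  intro l
  induction l with
  | nil =>
    intro node v g b v' g' i rest h hdrop hlen hG hI
    rw [loopA] at h
    injection h with h1; injection h1 with e1 h2; injection h2 with e2 e3
    subst e1; subst e2; subst e3
    have hi : ¬ i < (adjL dir node).length := by
      have := List.drop_eq_nil_iff.mp hdrop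
      omega
    rw [machineRun, dif_neg hi, if_pos rfl]
  | cons nxt ls ihl =>
    intro node v g b v' g' i rest h hdrop hlen hG hI
    have hi : i < (adjL dir node).length := by
      by_contra hni
      rw [List.drop_eq_nil_iff.mpr (by omega)] at hdrop
      simp at hdrop
    have hmem : nxt ∈ adjL dir node := by
      have hmem0 : nxt ∈ (adjL dir node).drop i := by
        rw [hdrop]; exact List.mem_cons_self
      exact List.drop_subset i (adjL dir node) hmem0
    have hgood := good_adjL hG hmem
    have hidx : (adjL dir node)[i] = nxt := by
      have h0 : ((adjL dir node).drop i)[0]'(by rw [hdrop]; simp) = nxt := by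
        simp [hdrop]
      rw [List.getElem_drop] at h0
      simpa using h0
    have hdrop' : (adjL dir node).drop (i + 1) = ls := by
      rw [← List.tail_drop, hdrop, List.tail_cons]
    rw [machineRun, dif_pos hi]
    simp only [hidx]
    rw [loopA] at h
    by_cases hv : getB v nxt = false
    · have hgF : ¬ getB g nxt = true := by
        intro hgb
        have hvt := hI (nidx g.length nxt) hgb
        rw [← hlen] at hvt
        exact absurd hvt (by simpa [getB] using hv)
      rw [if_pos hv] at h
      cases hd : dfsA dir f nxt v g with
      | none => rw [hd] at h; simp at h
      | some r =>
        obtain ⟨b1, v1, g1⟩ := r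
        rw [hd] at h
        cases f with
        | zero => simp [dfsA] at hd
        | succ f0 =>
          rw [if_neg hgF, if_neg (by simp [hv]), dif_pos (nidx_lt_of_range hgood.1 hgood.2)]
          have hd' := hd
          rw [dfsA] at hd'
          cases hl1 : loopA dir f0 (adjL dir nxt) (setB v nxt true) (setB g nxt true) with
          | none => rw [hl1] at hd'; simp at hd'
          | some r2 =>
            obtain ⟨b2, v2, g2⟩ := r2
            rw [hl1] at hd'
            have hlen2 : (setB v nxt true).length = (setB g nxt true).length := by
              simp [setB, hlen]
            have hGood2 : GoodDir dir (setB v nxt true).length := by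
              simpa [setB] using hG
            have hIH := IHf f0 (by omega) (adjL dir nxt) nxt (setB v nxt true)
              (setB g nxt true) b2 v2 g2 0 ((node, i + 1) :: rest) hl1 (by simp) hlen2
              hGood2 (Inv_set_both hlen (nidx_lt_of_range hgood.1 hgood.2) hI)
            cases b2 with
            | false =>
              replace hd' : (some (false, v2, g2) : Option (Bool × List Bool × List Bool)) =
                  some (b1, v1, g1) := hd'
              injection hd' with hd1; injection hd1 with e1 hd2; injection hd2 with e2 e3
              subst e1; subst e2; subst e3
              replace h : (some (false, v2, g2) : Option (Bool × List Bool × List Bool)) =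
                  some (b, v', g') := h
              injection h with h1; injection h1 with e1 h2; injection h2 with e2 e3
              subst e1; subst e2; subst e3
              rw [hIH, if_neg (by simp), if_neg (by simp)]
            | true =>
              replace hd' : (some (true, v2, setB g2 nxt false) :
                  Option (Bool × List Bool × List Bool)) = some (b1, v1, g1) := hd'
              injection hd' with hd1; injection hd1 with e1 hd2; injection hd2 with e2 e3
              subst e1; subst e2; subst e3
              replace h : (if getB (setB g2 nxt false) nxt = true then
                  some (false, v2, setB g2 nxt false)
                else loopA dir (f0 + 1) ls v2 (setB g2 nxt false)) = some (b, v', g') := h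
              rw [if_neg (by rw [getB_setB_false_self]; simp)] at h
              have hp := propsD dir (f0 + 1) _ _ _ _ _ _ hd hlen
              have hIH2 := ihl node v2 (setB g2 nxt false) b v' g' (i + 1) rest h hdrop'
                (hp.1.trans (hlen.trans hp.2.1.symm)) (by rw [hp.1]; exact hG)
                (hp.2.2.2 hI)
              rw [hIH, if_pos rfl, hIH2]
    · rw [if_neg hv] at h
      have hvT : getB v nxt = true := by
        cases hvb : getB v nxt
        · exact absurd hvb hv
        · rfl
      by_cases hg : getB g nxt = true
      · rw [if_pos hg] at h
        injection h with h1; injection h1 with e1 h2; injection h2 with e2 e3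
        subst e1; subst e2; subst e3
        rw [if_pos hg, if_neg (by simp)]
      · rw [if_neg hg] at h
        have hIH2 := ihl node v g b v' g' (i + 1) rest h hdrop' hlen hG hI
        rw [if_neg hg, if_pos hvT, hIH2]

-- the shared build phase produces in-range adjacency lists of the right length
theorem appendAt_length (d : List (List Int)) (a x : Int) :
    (appendAt d a x).length = d.length := by
  simp [appendAt]

theorem foldl_order_length (order : List (Int × Int)) :
    ∀ acc : List (List Int),
      (order.foldl (fun d ab => appendAt d ab.1 ab.2) acc).length = acc.length := by
  induction order with
  | nil => intro acc; rfl
  | cons p ps ih =>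
    intro acc
    rw [List.foldl_cons, ih, appendAt_length]

theorem bfsVisit_dir_length (v : List Bool) (que : List Int) (d : List (List Int)) (node : Int) :
    ∀ l, ((bfsVisit v que d node l).2.2).length = d.length := by
  intro l
  induction l generalizing v que d with
  | nil => rfl
  | cons nxt ls ih =>
    rw [bfsVisit]
    split
    · rw [ih, appendAt_length]
    · rw [ih]

theorem bfsRun_dir_length (graph : List (List Int)) (v : List Bool) (que : List Int)
    (d : List (List Int)) : (bfsRun graph v que d).length = d.length := by
  fun_induction bfsRun with
  | case1 => rfl
  | case2 v node rest d s ih =>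
    rw [ih, bfsVisit_dir_length]

theorem buildDir_length (n : Int) (path order : List (Int × Int)) :
    (buildDir n path order).length = n.toNat := by
  unfold buildDir
  rw [foldl_order_length, bfsRun_dir_length, List.length_replicate]

theorem buildDir_good (n : Int) (path order : List (Int × Int))
    (hpre : Pre_solution n path order) : GoodDir (buildDir n path order) n.toNat := by
  obtain ⟨hn, hpath, horder⟩ := hpre
  have hrep : ∀ k, GoodDir (List.replicate k ([] : List Int)) n.toNat := by
    intro k l hl x hx
    rw [List.eq_of_mem_replicate hl] at hx
    simp at hx
  have hstep : ∀ (d : List (List Int)) (a x : Int), GoodDir d n.toNat →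
      -n ≤ x → x < n → GoodDir (appendAt d a x) n.toNat := by
    intro d a x hG hx0 hxn l hl y hy
    rcases List.mem_or_eq_of_mem_set hl with h0 | h0
    · exact hG l h0 y hy
    · subst h0
      rcases List.mem_append.mp hy with h1 | h1
      · exact good_adjL hG h1
      · rw [List.mem_singleton.mp h1]
        omega
  have hgraph : ∀ acc, GoodDir acc n.toNat → (∀ p ∈ path, -n ≤ p.1 ∧ p.1 < n ∧ -n ≤ p.2 ∧ p.2 < n) →
      GoodDir (path.foldl (fun gr ab => appendAt (appendAt gr ab.1 ab.2) ab.2 ab.1) acc) n.toNat := by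
    clear hpath
    induction path with
    | nil => intro acc h _; exact h
    | cons p ps ih =>
      intro acc h hall
      rw [List.foldl_cons]
      have hp := hall p List.mem_cons_self
      exact ih _ (hstep _ _ _ (hstep _ _ _ h hp.2.2.1 hp.2.2.2) hp.1 hp.2.1)
        (fun q hq => hall q (List.mem_cons_of_mem _ hq))
  have hvisit : ∀ (l : List Int) (v : List Bool) (que : List Int) (d : List (List Int)) (node : Int),
      (∀ x ∈ l, -n ≤ x ∧ x < n) → GoodDir d n.toNat →
        GoodDir ((bfsVisit v que d node l).2.2) n.toNat := by
    intro l
    induction l with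
    | nil => intro v que d node _ h; exact h
    | cons nxt ls ih =>
      intro v que d node hall h
      have hx := hall nxt List.mem_cons_self
      rw [bfsVisit]
      split
      · exact ih _ _ _ _ (fun y hy => hall y (List.mem_cons_of_mem _ hy))
          (hstep _ _ _ h hx.1 hx.2)
      · exact ih _ _ _ _ (fun y hy => hall y (List.mem_cons_of_mem _ hy)) h
  have hbfs : ∀ (graph : List (List Int)) (v : List Bool) (que : List Int) (d : List (List Int)),
      GoodDir graph n.toNat → GoodDir d n.toNat → GoodDir (bfsRun graph v que d) n.toNat := by
    intro graph v que d
    fun_induction bfsRun with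
    | case1 => intro _ h; exact h
    | case2 v node rest d s ih =>
      intro hGg hGd
      refine ih hGg ?_
      refine hvisit _ _ _ _ _ ?_ hGd
      intro x hx
      have := good_adjL hGg hx
      omega
  have horderf : ∀ acc, GoodDir acc n.toNat →
      (∀ p ∈ order, -n ≤ p.1 ∧ p.1 < n ∧ -n ≤ p.2 ∧ p.2 < n) →
      GoodDir (order.foldl (fun d ab => appendAt d ab.1 ab.2) acc) n.toNat := by
    clear horder
    induction order with
    | nil => intro acc h _; exact h
    | cons p ps ih =>
      intro acc h hall
      rw [List.foldl_cons]
      have hp := hall p List.mem_cons_self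
      exact ih _ (hstep _ _ _ h hp.2.2.1 hp.2.2.2)
        (fun q hq => hall q (List.mem_cons_of_mem _ hq))
  unfold buildDir
  exact horderf _ (hbfs _ _ _ _ (hgraph _ (hrep _) hpath) (hrep _)) horder

-- ===== VERDICT (by name: the statement is the Claim_ definition above) =====
theorem solution_spec : Claim_equal_solution := by
  unfold Claim_equal_solution
  intro n path order hDom hPre
  unfold Spec_solution
  have hn : 1 ≤ n := hPre.1
  have hG : GoodDir (buildDir n path order) n.toNat := buildDir_good n path order hPre
  have hdl : (buildDir n path order).length = n.toNat := buildDir_length n path order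
  have h0 : getB (List.replicate n.toNat false) 0 = false := by
    unfold getB
    rw [List.getD_eq_getElem?_getD, List.getElem?_replicate]
    split <;> rfl
  have hcf : countF (List.replicate n.toNat false) ≤ n.toNat + 1 := by
    simp [countF]
  obtain ⟨⟨b1, v1, g1⟩, hr⟩ := suffD (buildDir n path order) (n.toNat + 1) 0
    (List.replicate n.toNat false) (List.replicate n.toNat false) h0 hcf
    (by rw [hdl]; simp) rfl
  rw [dfsA] at hr
  cases hl : loopA (buildDir n path order) (n.toNat + 1) (adjL (buildDir n path order) 0)
      (setB (List.replicate n.toNat false) 0 true)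
      (setB (List.replicate n.toNat false) 0 true) with
  | none => rw [hl] at hr; simp at hr
  | some r2 =>
    obtain ⟨b0, v2, g2⟩ := r2
    have hlenset : (setB (List.replicate n.toNat false) 0 true).length = n.toNat := by
      simp [setB]
    have hsim := simLoop (buildDir n path order) (n.toNat + 1)
      (adjL (buildDir n path order) 0) 0
      (setB (List.replicate n.toNat false) 0 true)
      (setB (List.replicate n.toNat false) 0 true) b0 v2 g2 0 [] hl List.drop_zero rfl
      (by rw [hlenset]; exact hG) (fun j hj => hj)
    show (match dfsA (buildDir n path order) (n.toNat + 2) 0 (List.replicate n.toNat false)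
        (List.replicate n.toNat false) with
      | some (b, _, _) => b
      | none => false) =
      machineRun (buildDir n path order) (setB (List.replicate n.toNat false) 0 true)
        (setB (List.replicate n.toNat false) 0 true) [(0, 0)]
    cases b0 with
    | false =>
      have hD : dfsA (buildDir n path order) (n.toNat + 2) 0 (List.replicate n.toNat false)
          (List.replicate n.toNat false) = some (false, v2, g2) := by
        rw [show n.toNat + 2 = n.toNat + 1 + 1 from rfl, dfsA, hl]
      rw [hD, hsim, if_neg (by simp)]
    | true =>
      have hD : dfsA (buildDir n path order) (n.toNat + 2) 0 (List.replicate n.toNat false)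
          (List.replicate n.toNat false) = some (true, v2, setB g2 0 false) := by
        rw [show n.toNat + 2 = n.toNat + 1 + 1 from rfl, dfsA, hl]
      rw [hD, hsim, if_pos rfl, machineRun]
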